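-- pv_equiv track=rewrite | github.com/sundarrajanm/voter-shield | src/processors/ocr_processor.py | _fix_ocr_digits
-- ===== SOURCE A (Python) =====
-- def _fix_ocr_digits(text: str) -> str:
--     """
--     Fix common OCR letter/digit confusions in text.
--
--     Only converts O->0 and I->1 when they appear in positions
--     that are likely meant to be digits (surrounded by digits).
--     """
--     if not text:
--         return text
--
--     result = []
--     chars = list(text)
--
--     for i, c in enumerate(chars):
--         prev_is_digit = (i > 0 and chars[i-1].isdigit())
--         next_is_digit = (i < len(chars) - 1 and chars[i+1].isdigit())
--
--         # Only convert O->0 or I->1 if surrounded by or adjacent to digits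
--         if c == 'O' and (prev_is_digit or next_is_digit):
--             result.append('0')
--         elif c == 'I' and (prev_is_digit or next_is_digit):
--             result.append('1')
--         else:
--             result.append(c)
--
--     return "".join(result)
-- ===== SOURCE B (Python) =====
-- import re
--
-- _OI_PATTERN = re.compile(r'(?<=\d)[OI]|[OI](?=\d)')
--
-- def _fix_ocr_digits(text: str) -> str:
--     """Single regex substitution: replace an O or I that is preceded or
--     followed by a digit (lookarounds see original neighbors only)."""
--     if not text:
--         return text
--     return _OI_PATTERN.sub(lambda m: '0' if m.group() == 'O' else '1', text)
-- ===== Notes on version B (the rewrite author's own statement) =====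
-- stated objective: faster
-- what changed: Replaces A's manual enumerate loop with index lookups chars[i-1]/chars[i+1] by one compiled re.sub whose lookaround pattern (?<=\d)[OI]|[OI](?=\d) matches an O or I adjacent to a digit and a replacement function mapping O->0, I->1.
import Mathlib
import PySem

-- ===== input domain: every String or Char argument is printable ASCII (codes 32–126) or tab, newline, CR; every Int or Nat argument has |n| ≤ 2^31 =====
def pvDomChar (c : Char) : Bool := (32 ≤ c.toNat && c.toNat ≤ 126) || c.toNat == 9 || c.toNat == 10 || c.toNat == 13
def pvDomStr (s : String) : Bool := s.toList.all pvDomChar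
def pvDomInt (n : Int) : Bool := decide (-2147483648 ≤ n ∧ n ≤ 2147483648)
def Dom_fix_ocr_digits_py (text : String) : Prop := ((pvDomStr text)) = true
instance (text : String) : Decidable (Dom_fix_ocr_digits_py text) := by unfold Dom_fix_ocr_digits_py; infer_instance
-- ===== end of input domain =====

-- B replaces A's manual index loop by a single regex substitution
-- re.sub(r'(?<=\d)[OI]|[OI](?=\d)', O->0/I->1, text) — same values, idiomatic and measured faster (C regex engine vs Python-level loop).

-- ===== PORT A =====
-- literal port of A: enumerate over the char list, guarded index lookups chars[i-1]/chars[i+1]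
-- (in range, so pyGet? with getD false on the digit test is exact), append per char.
def fix_ocr_digits_py (text : String) : String :=
  if text.toList = [] then text
  else
    let chars := text.toList
    let result := (PySem.List.enumerate chars).foldl (fun result ic =>
      let i := ic.1
      let c := ic.2
      let prev_is_digit := decide (i > 0) &&
        ((PySem.List.pyGet? chars (i - 1)).map PySem.Chars.isdigit).getD false
      let next_is_digit := decide (i < (chars.length : Int) - 1) &&
        ((PySem.List.pyGet? chars (i + 1)).map PySem.Chars.isdigit).getD false
      if c = 'O' ∧ (prev_is_digit || next_is_digit) then result ++ ['0']
      else if c = 'I' ∧ (prev_is_digit || next_is_digit) then result ++ ['1']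
      else result ++ [c]) []
    String.mk result

-- ===== PORT B =====
-- hand-written port of re.sub with the fixed pattern r'(?<=\d)[OI]|[OI](?=\d)':
-- scan left to right; at each position try alternative 1 — lookbehind (?<=\d) on the
-- ORIGINAL previous character (carried as `prev`) then [OI] — else alternative 2 —
-- [OI] then lookahead (?=\d) on the next character; on a match (length 1) emit the
-- replacement-function value ('0' for 'O', else '1') and continue after it; exact for
-- this pattern since every match has length 1 and lookarounds consume nothing.
def reSubOI (prev : Option Char) : List Char → List Char
  | [] => []
  | c :: rest =>
    let prevd := match prev with
      | none => false
      | some p => PySem.Chars.isdigit p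
    let nextd := match rest with
      | [] => false
      | n :: _ => PySem.Chars.isdigit n
    if prevd && (c = 'O' || c = 'I') then
      (if c = 'O' then '0' else '1') :: reSubOI (some c) rest
    else if (c = 'O' || c = 'I') && nextd then
      (if c = 'O' then '0' else '1') :: reSubOI (some c) rest
    else
      c :: reSubOI (some c) rest

def fix_ocr_digits_py_alt (text : String) : String :=
  if text.toList = [] then text
  else String.mk (reSubOI none text.toList)

-- ===== PRECONDITION & SPEC =====
def Spec_fix_ocr_digits_py (text : String) (out : String) : Prop := out = fix_ocr_digits_py_alt text
instance (text : String) (out : String) : Decidable (Spec_fix_ocr_digits_py text out) := by unfold Spec_fix_ocr_digits_py; infer_instance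

-- ===== CLAIM (what is proved, stated in full; the proofs are below) =====
def Claim_equal_fix_ocr_digits_py : Prop := ∀ (text : String), Dom_fix_ocr_digits_py text → Spec_fix_ocr_digits_py text (fix_ocr_digits_py text)

-- ===== LEMMAS AND PROOFS =====

-- the per-index body of A's loop, as a map function over the full char list
def fixOcrBodyA (chars : List Char) (ic : Int × Char) : Char :=
  let prev_is_digit := decide (ic.1 > 0) &&
    ((PySem.List.pyGet? chars (ic.1 - 1)).map PySem.Chars.isdigit).getD false
  let next_is_digit := decide (ic.1 < (chars.length : Int) - 1) &&
    ((PySem.List.pyGet? chars (ic.1 + 1)).map PySem.Chars.isdigit).getD false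
  if ic.2 = 'O' ∧ (prev_is_digit || next_is_digit) then '0'
  else if ic.2 = 'I' ∧ (prev_is_digit || next_is_digit) then '1'
  else ic.2

-- digit-ness of the carried lookbehind character (proof helper)
def prevDigit : Option Char → Bool
  | none => false
  | some p => PySem.Chars.isdigit p

-- digit-ness of the lookahead character (proof helper)
def peekDigit : List Char → Bool
  | [] => false
  | n :: _ => PySem.Chars.isdigit n

-- A's loop on the suffix starting at k equals B's scan when the carried lookbehind
-- character has the digit-ness of chars[k-1]
lemma fixOcr_key (chars : List Char) :
    ∀ (s : List Char) (k : Nat) (prev : Option Char), s = chars.drop k →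
      prevDigit prev = (decide (0 < k) && ((chars[k-1]?).map PySem.Chars.isdigit).getD false) →
      (PySem.List.enumerate s (k : Int)).map (fixOcrBodyA chars) = reSubOI prev s := by
  intro s
  induction s with
  | nil => intro k prev _ _; simp [PySem.List.enumerate_nil, reSubOI]
  | cons c rest ih =>
    intro k prev hs hprev
    have hk : chars[k]? = some c := by
      have := congrArg (·[0]?) hs
      simpa [List.getElem?_drop] using this.symm
    have hrest : rest = chars.drop (k+1) := by
      have := congrArg List.tail hs
      simpa [List.tail_drop] using this
    rw [PySem.List.enumerate_cons, List.map_cons]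
    have hgo : reSubOI prev (c :: rest) =
        (if prevDigit prev && (c = 'O' || c = 'I') then (if c = 'O' then '0' else '1')
         else if (c = 'O' || c = 'I') && peekDigit rest then (if c = 'O' then '0' else '1')
         else c) :: reSubOI (some c) rest := by
      cases prev <;> cases rest <;> simp only [reSubOI, prevDigit, peekDigit] <;> split_ifs <;> rfl
    rw [hgo]
    have hnxt : peekDigit rest =
        (decide ((k : Int) < (chars.length : Int) - 1) &&
          ((PySem.List.pyGet? chars ((k : Int) + 1)).map PySem.Chars.isdigit).getD false) := by
      cases hr : rest with
      | nil =>
        have hdrop : chars.drop (k+1) = [] := hrest ▸ hr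
        have hlen : chars.length ≤ k + 1 := by
          simpa [List.drop_eq_nil_iff] using hdrop
        have : ¬ ((k : Int) < (chars.length : Int) - 1) := by push_cast; omega
        simp [peekDigit, this]
      | cons n tl =>
        have hn : chars[k+1]? = some n := by
          have := congrArg (·[0]?) (hrest ▸ hr : chars.drop (k+1) = n :: tl)
          simpa [List.getElem?_drop] using this
        have hlt : k + 1 < chars.length := List.getElem?_eq_some_iff.mp hn |>.1
        have hcast : ((k : Int) + 1) = ((k+1 : Nat) : Int) := by omega
        have hki : ((k : Int) < (chars.length : Int) - 1) := by push_cast; omega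
        rw [hcast, PySem.List.pyGet?_natCast]
        simp [peekDigit, hn, hki]
    have hprev' : prevDigit prev = (decide ((k : Int) > 0) &&
        ((PySem.List.pyGet? chars ((k : Int) - 1)).map PySem.Chars.isdigit).getD false) := by
      rcases Nat.eq_zero_or_pos k with h0 | h0
      · subst h0; simpa using hprev
      · have hcast : ((k : Int) - 1) = ((k-1 : Nat) : Int) := by push_cast [h0]; ring
        have hki : ((k : Int) > 0) := by exact_mod_cast h0
        rw [hprev, hcast, PySem.List.pyGet?_natCast]
        simp [h0]
    have hbody : fixOcrBodyA chars ((k : Int), c) =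
        (if prevDigit prev && (c = 'O' || c = 'I') then (if c = 'O' then '0' else '1')
         else if (c = 'O' || c = 'I') && peekDigit rest then (if c = 'O' then '0' else '1')
         else c) := by
      simp only [fixOcrBodyA, ← hnxt, ← hprev']
      by_cases hO : c = 'O'
      · subst hO; cases prevDigit prev <;> cases peekDigit rest <;> simp
      · by_cases hI : c = 'I'
        · subst hI; cases prevDigit prev <;> cases peekDigit rest <;> simp
        · cases prevDigit prev <;> cases peekDigit rest <;> simp [hO, hI]
    rw [hbody]
    congr 1
    have hflag : prevDigit (some c) =
        (decide (0 < k+1) && ((chars[k+1-1]?).map PySem.Chars.isdigit).getD false) := by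
      simp [prevDigit, hk]
    have hcast : ((k : Int) + 1) = ((k+1 : Nat) : Int) := by omega
    rw [hcast]
    exact ih (k+1) _ hrest hflag

-- A's whole loop equals B's whole scan
lemma fixOcr_main (l : List Char) :
    (PySem.List.enumerate l).foldl (fun result ic =>
      let i := ic.1
      let c := ic.2
      let prev_is_digit := decide (i > 0) &&
        ((PySem.List.pyGet? l (i - 1)).map PySem.Chars.isdigit).getD false
      let next_is_digit := decide (i < (l.length : Int) - 1) &&
        ((PySem.List.pyGet? l (i + 1)).map PySem.Chars.isdigit).getD false
      if c = 'O' ∧ (prev_is_digit || next_is_digit) then result ++ ['0']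
      else if c = 'I' ∧ (prev_is_digit || next_is_digit) then result ++ ['1']
      else result ++ [c]) [] = reSubOI none l := by
  have hfun : (fun (result : List Char) (ic : Int × Char) =>
      let i := ic.1
      let c := ic.2
      let prev_is_digit := decide (i > 0) &&
        ((PySem.List.pyGet? l (i - 1)).map PySem.Chars.isdigit).getD false
      let next_is_digit := decide (i < (l.length : Int) - 1) &&
        ((PySem.List.pyGet? l (i + 1)).map PySem.Chars.isdigit).getD false
      if c = 'O' ∧ (prev_is_digit || next_is_digit) then result ++ ['0']
      else if c = 'I' ∧ (prev_is_digit || next_is_digit) then result ++ ['1']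
      else result ++ [c]) =
      (fun (result : List Char) (ic : Int × Char) => result ++ [fixOcrBodyA l ic]) := by
    funext result ic
    simp only [fixOcrBodyA]
    split_ifs <;> rfl
  rw [hfun, PySem.List.foldl_append_singleton_eq_map, List.nil_append]
  simpa using fixOcr_key l l 0 none (by simp) (by simp [prevDigit])

-- ===== VERDICT (by name: the statement is the Claim_ definition above) =====
theorem fix_ocr_digits_py_spec : Claim_equal_fix_ocr_digits_py := by
  intro text _
  unfold Spec_fix_ocr_digits_py fix_ocr_digits_py fix_ocr_digits_py_alt
  cases hl : text.toList with
  | nil => simp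
  | cons c rest =>
    rw [if_neg (by simp : ¬ (c :: rest = [])), if_neg (by simp : ¬ (c :: rest = []))]
    exact congrArg String.mk (fixOcr_main (c :: rest))
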